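-- pv_equiv track=rewrite | github.com/pypi-data/pypi-mirror-99 | packages/r2g-gui/r2g_gui-0.1.1.tar.gz/r2g_gui-0.1.1/src/r2g_gui/main_window.py | check_sequences
-- ===== SOURCE A (Python) =====
-- from copy import deepcopy
--
-- def check_sequences(seq):
--     is_seq = [True, True, True]
--     if len(seq) > 0:
--         alphabets = [
--             "ACDEFGHIKLMNPQRSTVWYBXZJUO",  # ambiguous protein
--             "GATCRYWSMKHBVDNU",  # ambiguous nucleotide (DNA & RNA)
--             "ATGCUN",  # relatively accurate nucleotide (DNA & RNA)
--         ]
--         # convert to dict: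
--         for i in range(len(alphabets)):
--             alphabet = {}
--             for chr in alphabets[i]:
--                 alphabet[chr] = None
--             alphabets[i] = deepcopy(alphabet)
--         if seq.strip()[0] == ">":
--             seq = ''.join(seq.strip().splitlines()[1:]).upper()
--         else:
--             seq = ''.join(seq.strip().splitlines()).upper()
--         seq = ''.join(seq.strip().split())  # remove blanks
--         for i in range(len(alphabets)):
--             for letter in seq:
--                 if letter not in alphabets[i]:
--                     is_seq[i] = False
--                     break
--         # If sequences only contain ATGCUN, it is very possible that they are nuleotides:
--         if is_seq[2] is True:
--             is_seq[0] = False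
--     return is_seq
-- ===== SOURCE B (Python) =====
-- def check_sequences(seq):
--     # Alternative: one combined pass over the cleaned sequence instead of three sequential scans.
--     if len(seq) == 0:
--         return [True, True, True]
--     protein = set("ACDEFGHIKLMNPQRSTVWYBXZJUO")
--     ambig_nt = set("GATCRYWSMKHBVDNU")
--     strict_nt = set("ATGCUN")
--     stripped = seq.strip()
--     lines = stripped.splitlines()
--     if stripped[0] == ">":
--         lines = lines[1:]
--     cleaned = "".join("".join(lines).upper().strip().split())
--     is_seq = [True, True, True]
--     for ch in cleaned:
--         is_seq = [ok and (ch in alpha)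
--                   for ok, alpha in zip(is_seq, (protein, ambig_nt, strict_nt))]
--         if not any(is_seq):
--             break
--     if is_seq[2]:
--         is_seq[0] = False
--     return is_seq
-- ===== Notes on version B (the rewrite author's own statement) =====
-- stated objective: alternative
-- what changed: Replaces A's three sequential full scans of the cleaned sequence (each against a dict built char-by-char) with a single pass that updates all three alphabet flags at once (sets, early exit when all three flags are dead), then the same nucleotide override.
import Mathlib
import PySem

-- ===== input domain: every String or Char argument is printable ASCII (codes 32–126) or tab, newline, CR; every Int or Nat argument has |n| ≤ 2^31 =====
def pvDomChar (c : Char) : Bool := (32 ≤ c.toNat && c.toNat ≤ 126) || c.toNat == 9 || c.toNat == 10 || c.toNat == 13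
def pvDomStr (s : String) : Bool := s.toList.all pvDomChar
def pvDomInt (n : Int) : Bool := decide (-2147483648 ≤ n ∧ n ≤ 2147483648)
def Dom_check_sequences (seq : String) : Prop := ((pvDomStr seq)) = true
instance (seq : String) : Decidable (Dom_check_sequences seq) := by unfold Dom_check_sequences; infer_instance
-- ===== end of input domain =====

-- B replaces A's three sequential scans of the cleaned sequence by one combined pass updating all
-- three alphabet flags at once (alternative decomposition, same cost).

-- ===== PORT A =====
-- Python: alphabet = {}; for chr in alphabets[i]: alphabet[chr] = None  (deepcopy is a no-op for this value)
def aDictOf (cs : List Char) : PySem.Dict Char (Option Unit) :=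
  cs.foldl (fun d c => d.insert c none) (PySem.Dict.mk [])

-- Python: for letter in seq: if letter not in alphabets[i]: is_seq[i] = False; break
-- returns true iff the loop hit the break (some letter outside the dict)
def aMiss (d : PySem.Dict Char (Option Unit)) : List Char → Bool
  | [] => false
  | c :: rest => if d.contains c = false then true else aMiss d rest

def check_sequences (seq : String) : List Bool :=
  let is_seq := [true, true, true]
  if PySem.Str.len seq > 0 then
    let alphabets : List (PySem.Dict Char (Option Unit)) :=
      [aDictOf "ACDEFGHIKLMNPQRSTVWYBXZJUO".toList,
       aDictOf "GATCRYWSMKHBVDNU".toList,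
       aDictOf "ATGCUN".toList]
    let st := PySem.Chars.strip seq.toList
    match PySem.List.pyGet? st 0 with
    | none => []  -- seq.strip()[0] raises IndexError here; excluded by Pre_
    | some c =>
      let joined :=
        if c = '>' then
          PySem.Chars.upper (PySem.Chars.join [] (PySem.List.slice (PySem.Chars.splitlines st) (some 1) none))
        else
          PySem.Chars.upper (PySem.Chars.join [] (PySem.Chars.splitlines st))
      let cleaned := PySem.Chars.join [] (PySem.Chars.split₀ (PySem.Chars.strip joined))
      let is_seq2 := (PySem.List.pyRange 0 3 1).foldl
        (fun acc i =>
          if aMiss (PySem.List.pyGetD alphabets i (PySem.Dict.mk [])) cleaned then acc.set i.toNat false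
          else acc) is_seq
      if (PySem.List.pyGetD is_seq2 2 false) = true then is_seq2.set 0 false else is_seq2
  else is_seq

-- ===== PORT B =====
def bProtein : PySem.Set Char := PySem.Set.ofList "ACDEFGHIKLMNPQRSTVWYBXZJUO".toList
def bAmbigNt : PySem.Set Char := PySem.Set.ofList "GATCRYWSMKHBVDNU".toList
def bStrictNt : PySem.Set Char := PySem.Set.ofList "ATGCUN".toList

-- one pass: update all three flags per character; break when all three are dead
def bLoop : Bool × Bool × Bool → List Char → Bool × Bool × Bool
  | st, [] => st
  | (b0, b1, b2), c :: rest =>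
    let st' := (b0 && bProtein.contains c, b1 && bAmbigNt.contains c, b2 && bStrictNt.contains c)
    if st'.1 || st'.2.1 || st'.2.2 then bLoop st' rest else st'

def check_sequences_alt (seq : String) : List Bool :=
  if PySem.Str.len seq = 0 then [true, true, true]
  else
    let st := PySem.Chars.strip seq.toList
    let lines := PySem.Chars.splitlines st
    match PySem.List.pyGet? st 0 with
    | none => []  -- stripped[0] raises IndexError here; excluded by Pre_
    | some c =>
      let body := if c = '>' then PySem.List.slice lines (some 1) none else lines
      let cleaned :=
        PySem.Chars.join [] (PySem.Chars.split₀ (PySem.Chars.strip (PySem.Chars.upper (PySem.Chars.join [] body))))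
      match bLoop (true, true, true) cleaned with
      | (b0, b1, b2) => if b2 then [false, b1, b2] else [b0, b1, b2]

-- ===== PRECONDITION & SPEC =====
-- Pre_ excludes only the nonempty whitespace-only strings, on which BOTH programs raise IndexError
-- (subscript [0] of the empty result of seq.strip()).
def Pre_check_sequences (seq : String) : Prop := seq = "" ∨ PySem.Chars.strip seq.toList ≠ []
instance (seq : String) : Decidable (Pre_check_sequences seq) := by unfold Pre_check_sequences; infer_instance
def pvWitness_check_sequences : String := "ATG"

def Spec_check_sequences (seq : String) (out : List Bool) : Prop := out = check_sequences_alt seq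
instance (seq : String) (out : List Bool) : Decidable (Spec_check_sequences seq out) := by unfold Spec_check_sequences; infer_instance

-- ===== CLAIM (what is proved, stated in full; the proofs are below) =====
def Claim_equal_check_sequences : Prop := ∀ (seq : String), Dom_check_sequences seq → Pre_check_sequences seq → Spec_check_sequences seq (check_sequences seq)

-- ===== LEMMAS AND PROOFS =====

theorem aMiss_eq (d : PySem.Dict Char (Option Unit)) (cs : List Char) :
    aMiss d cs = !cs.all (fun c => d.contains c) := by
  induction cs with
  | nil => rfl
  | cons c rest ih =>
    simp only [aMiss, List.all_cons]
    by_cases h : d.contains c = false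
    · simp [h]
    · simp only [if_neg h, ih]
      have hc : d.contains c = true := by
        cases hx : d.contains c
        · exact absurd hx h
        · rfl
      simp [hc]

theorem contains_foldl_insert (l : List Char) (d : PySem.Dict Char (Option Unit)) (c : Char) :
    (l.foldl (fun d c => d.insert c none) d).contains c = (d.contains c || l.contains c) := by
  induction l generalizing d with
  | nil => simp
  | cons x xs ih =>
    simp only [List.foldl_cons, ih, PySem.Dict.contains_insert, List.contains_cons]
    cases h : d.contains c <;> cases hx : (c == x) <;> simp [Bool.or_comm]

theorem contains_aDictOf (l : List Char) (c : Char) :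
    (aDictOf l).contains c = l.contains c := by
  unfold aDictOf
  rw [contains_foldl_insert]
  simp [PySem.Dict.contains]

theorem contains_ofList (l : List Char) (c : Char) :
    (PySem.Set.ofList l).contains c = l.contains c := by
  rw [Bool.eq_iff_iff]
  simp [PySem.Set.mem_ofList]

theorem bLoop_eq (cs : List Char) (b0 b1 b2 : Bool) :
    bLoop (b0, b1, b2) cs =
      (b0 && cs.all (fun c => bProtein.contains c),
       b1 && cs.all (fun c => bAmbigNt.contains c),
       b2 && cs.all (fun c => bStrictNt.contains c)) := by
  induction cs generalizing b0 b1 b2 with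
  | nil => simp [bLoop]
  | cons c rest ih =>
    have hstep : bLoop (b0, b1, b2) (c :: rest)
        = (if (b0 && bProtein.contains c || b1 && bAmbigNt.contains c || b2 && bStrictNt.contains c) = true
           then bLoop (b0 && bProtein.contains c, b1 && bAmbigNt.contains c, b2 && bStrictNt.contains c) rest
           else (b0 && bProtein.contains c, b1 && bAmbigNt.contains c, b2 && bStrictNt.contains c)) := rfl
    rw [hstep]
    by_cases h : (b0 && bProtein.contains c || b1 && bAmbigNt.contains c || b2 && bStrictNt.contains c) = true
    · rw [if_pos h, ih]
      simp [Bool.and_assoc]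
    · rw [if_neg h]
      have hh := Bool.eq_false_iff.mpr h
      rw [Bool.or_eq_false_iff, Bool.or_eq_false_iff] at hh
      obtain ⟨⟨h0, h1⟩, h2⟩ := hh
      simp only [List.all_cons, ← Bool.and_assoc, h0, h1, h2, Bool.false_and]

theorem core_eq (s : List Char) :
    (let is_seq2 := (PySem.List.pyRange 0 3 1).foldl
        (fun acc i => if aMiss (PySem.List.pyGetD
            [aDictOf "ACDEFGHIKLMNPQRSTVWYBXZJUO".toList,
             aDictOf "GATCRYWSMKHBVDNU".toList,
             aDictOf "ATGCUN".toList] i (PySem.Dict.mk [])) s then acc.set i.toNat false else acc)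
        [true, true, true];
     if (PySem.List.pyGetD is_seq2 2 false) = true then is_seq2.set 0 false else is_seq2)
    = (match bLoop (true, true, true) s with
       | (b0, b1, b2) => if b2 then [false, b1, b2] else [b0, b1, b2]) := by
  rw [show PySem.List.pyRange 0 3 1 = ([0, 1, 2] : List Int) from rfl]
  rw [bLoop_eq]
  simp only [List.foldl_cons, List.foldl_nil,
    show ∀ d0 d1 d2 : PySem.Dict Char (Option Unit),
      PySem.List.pyGetD [d0, d1, d2] (0 : Int) (PySem.Dict.mk []) = d0 from fun _ _ _ => rfl,
    show ∀ d0 d1 d2 : PySem.Dict Char (Option Unit),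
      PySem.List.pyGetD [d0, d1, d2] (1 : Int) (PySem.Dict.mk []) = d1 from fun _ _ _ => rfl,
    show ∀ d0 d1 d2 : PySem.Dict Char (Option Unit),
      PySem.List.pyGetD [d0, d1, d2] (2 : Int) (PySem.Dict.mk []) = d2 from fun _ _ _ => rfl,
    aMiss_eq, contains_aDictOf, bProtein, bAmbigNt, bStrictNt, contains_ofList,
    Bool.true_and]
  cases h0 : s.all (fun c => ("ACDEFGHIKLMNPQRSTVWYBXZJUO".toList).contains c) <;>
    cases h1 : s.all (fun c => ("GATCRYWSMKHBVDNU".toList).contains c) <;>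
      cases h2 : s.all (fun c => ("ATGCUN".toList).contains c) <;>
        simp [PySem.List.pyGetD, PySem.List.pyGet?, PySem.List.pyIdx?, List.set]

-- ===== VERDICT (by name: the statement is the Claim_ definition above) =====
theorem check_sequences_spec : Claim_equal_check_sequences := by
  intro seq _dom pre
  unfold Spec_check_sequences
  by_cases hempty : seq = ""
  · subst hempty; decide
  · have hlen : PySem.Str.len seq > 0 := by
      have hnil : seq.toList ≠ [] := fun h => hempty (String.toList_eq_nil_iff.mp h)
      have hpos : 0 < seq.toList.length := List.length_pos_iff.mpr hnil
      simp only [PySem.Str.len]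
      exact_mod_cast hpos
    have hst : PySem.Chars.strip seq.toList ≠ [] := by
      rcases pre with h | h
      · exact absurd h hempty
      · exact h
    unfold check_sequences check_sequences_alt
    rw [if_pos hlen, if_neg (by omega)]
    obtain ⟨c, rest, hcr⟩ : ∃ c rest, PySem.Chars.strip seq.toList = c :: rest := by
      cases h : PySem.Chars.strip seq.toList with
      | nil => exact absurd h hst
      | cons a l => exact ⟨a, l, rfl⟩
    rw [hcr]
    have hget : PySem.List.pyGet? (c :: rest) (0 : Int) = some c := by
      simp [PySem.List.pyGet?, PySem.List.pyIdx?]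
    simp only [hget]
    by_cases hc : c = '>'
    · subst hc
      simp only [reduceIte]
      exact core_eq _
    · simp only [if_neg hc]
      exact core_eq _
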